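-- pv_equiv track=rewrite | github.com/cafrii/omega2 | 백준/Gold/2229. 조 짜기/a2229.py | solve7
-- ===== SOURCE A (Python) =====
-- def solve7(A:list[int])->int:
--     '''
--     가장 최적화 된 알고리즘 같음.
--
--     출처:
--     https://www.acmicpc.net/source/94375518
--
--     '''
--
--     N = len(A)
--     dp = [0] * N
--     # dp[k] 는 학생 0 부터 학생 k 만을 대상으로 조짜기 했을 때의 최대 점수.
--
--     # dp[0] = 0  # 1인 조는 점수 0
--
--     for i in range(1, N):
--         # (0 ~ i-1) 까지의 최적 해가 구해진 상태에서 (dp[i-1]에 저장)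
--         # 새롭게 A[i] 가 추가되었을 때 늘어난 인원에 대해 조짜기의 최대 점수를 계산.
--         #
--         # 즉, dp[0] ~ dp[i-1] 을 아는 상태에서 dp[i] 구하기.
--
--         mx, mn = A[i], A[i]
--         dp[i] = dp[i-1]
--
--         # 분할점 j를 한칸씩 앞으로 이동시켜 가며,
--         # 새로 추가된 A[i] 조를 어느 조에 포함시켜야 최대 점수가 갱신되는지 확인.
--         # j==0 인 경우는 모두 다 하나의 조로 구성하는 것.
--
--         for j in range(i-1, -1, -1):  # j: i-1 ~ 0
--
--             mx, mn = max(mx, A[j]), min(mn, A[j])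
--             #
--             #  { (0, ..) (.., j-1) } (j, ..., i-1, i)
--             #       dp[j-1]              mx, mn
--
--             dp[i] = max(dp[i], mx-mn) if j==0 else \
--                     max(dp[i], dp[j-1]+mx-mn)
--
--
--     return dp[N-1]
-- ===== SOURCE B (Python) =====
-- def solve7(A: list[int]) -> int:
--     # O(N) DP: any group can be split so that each scoring group starts and
--     # ends at its own max/min, so the answer is the best sum of |A[p]-A[q]|
--     # over disjoint index intervals [p,q]; two running maxima replace the
--     # quadratic inner scan.
--     prev = 0                 # dp[i-1], with dp[-1] = 0
--     bp, bm = A[0], -A[0]     # max over p<=i of dp[p-1] + A[p] / dp[p-1] - A[p]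
--     for a in A:
--         bp = max(bp, prev + a)
--         bm = max(bm, prev - a)
--         prev = max(prev, bp - a, bm + a)
--     return prev
-- ===== Notes on version B (the rewrite author's own statement) =====
-- stated objective: faster
-- what changed: Replaced the quadratic backward inner scan over all split points by an O(n) single pass: since any group can be split so that each scoring group starts and ends at its own extremes, dp[i] = max(dp[i-1], BP - A[i], BM + A[i]) where BP/BM are running maxima of dp[p-1]+A[p] and dp[p-1]-A[p].
import Mathlib
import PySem

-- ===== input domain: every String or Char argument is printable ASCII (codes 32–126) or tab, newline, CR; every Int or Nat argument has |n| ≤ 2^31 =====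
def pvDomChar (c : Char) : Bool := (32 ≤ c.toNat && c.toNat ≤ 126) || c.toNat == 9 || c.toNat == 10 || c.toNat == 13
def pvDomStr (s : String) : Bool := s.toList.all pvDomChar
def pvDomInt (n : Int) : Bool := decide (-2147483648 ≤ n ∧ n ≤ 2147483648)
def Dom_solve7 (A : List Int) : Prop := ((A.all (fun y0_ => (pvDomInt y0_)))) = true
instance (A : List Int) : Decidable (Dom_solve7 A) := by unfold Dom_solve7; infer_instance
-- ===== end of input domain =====

-- B replaces A's quadratic inner scan by an O(n) pass with two running maxima (proved equal below).

-- ===== PORT A =====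
-- A-side helper: the body of the inner loop 'for j in range(i-1, -1, -1)', state (mx, mn, dp)
def innerStepA (A : List Int) (i : Int) (s : Int × Int × List Int) (j : Int) : Int × Int × List Int :=
  let mx := max s.1 (PySem.List.pyGetD A j 0)
  let mn := min s.2.1 (PySem.List.pyGetD A j 0)
  let dp := s.2.2
  let v := if j == 0 then max (PySem.List.pyGetD dp i 0) (mx - mn)
           else max (PySem.List.pyGetD dp i 0) (PySem.List.pyGetD dp (j - 1) 0 + mx - mn)
  (mx, mn, PySem.List.pySetD dp i v)

-- A-side helper: one iteration of the outer loop 'for i in range(1, N)'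
def outerStepA (A : List Int) (dp : List Int) (i : Int) : List Int :=
  ((PySem.List.pyRange (i - 1) (-1) (-1)).foldl (innerStepA A i)
    (PySem.List.pyGetD A i 0, PySem.List.pyGetD A i 0,
     PySem.List.pySetD dp i (PySem.List.pyGetD dp (i - 1) 0))).2.2

def solve7 (A : List Int) : Int :=
  let N : Int := A.length
  let dp : List Int := List.replicate A.length (0 : Int)
  let dp := (PySem.List.pyRange 1 N 1).foldl (outerStepA A) dp
  PySem.List.pyGetD dp (N - 1) 0

-- ===== PORT B =====
-- B-side helper: the loop body of Source B (state (prev, bp, bm), element a)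
def stepB (s : Int × Int × Int) (x : Int) : Int × Int × Int :=
  let prev := s.1
  let bp := max s.2.1 (prev + x)
  let bm := max s.2.2 (prev - x)
  (max prev (max (bp - x) (bm + x)), bp, bm)

def solve7_alt (A : List Int) : Int :=
  (A.foldl stepB (0, PySem.List.pyGetD A 0 0, -(PySem.List.pyGetD A 0 0))).1

-- ===== PRECONDITION & SPEC =====
-- Pre_ excludes only the empty list, on which A raises IndexError (dp[-1] of an empty dp).
def Pre_solve7 (A : List Int) : Prop := A ≠ []
instance (A : List Int) : Decidable (Pre_solve7 A) := by unfold Pre_solve7; infer_instance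
def pvWitness_solve7 : List Int := [3, 1, 4, 2]

def Spec_solve7 (A : List Int) (out : Int) : Prop := out = solve7_alt A
instance (A : List Int) (out : Int) : Decidable (Spec_solve7 A out) := by unfold Spec_solve7; infer_instance

-- ===== CLAIM (what is proved, stated in full; the proofs are below) =====
def Claim_equal_solve7 : Prop := ∀ (A : List Int), Dom_solve7 A → Pre_solve7 A → Spec_solve7 A (solve7 A)

-- ===== LEMMAS AND PROOFS =====

-- max/min of g over the index window [j, j+d]
def rmaxF : ℕ → (ℕ → Int) → ℕ → Int
  | 0, g, j => g j
  | d+1, g, j => max (g j) (rmaxF d g (j+1))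

def rminF : ℕ → (ℕ → Int) → ℕ → Int
  | 0, g, j => g j
  | d+1, g, j => min (g j) (rminF d g (j+1))

theorem rmaxF_succ_right (d : ℕ) (g : ℕ → Int) (j : ℕ) :
    rmaxF (d+1) g j = max (rmaxF d g j) (g (j+d+1)) := by
  induction d generalizing j with
  | zero => simp [rmaxF]
  | succ d ih =>
    show max (g j) (rmaxF (d+1) g (j+1)) = _
    rw [ih (j+1)]
    have h1 : j+1+d+1 = j+(d+1)+1 := by omega
    rw [h1, ← max_assoc]
    rfl

theorem rminF_succ_right (d : ℕ) (g : ℕ → Int) (j : ℕ) :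
    rminF (d+1) g j = min (rminF d g j) (g (j+d+1)) := by
  induction d generalizing j with
  | zero => simp [rminF]
  | succ d ih =>
    show min (g j) (rminF (d+1) g (j+1)) = _
    rw [ih (j+1)]
    have h1 : j+1+d+1 = j+(d+1)+1 := by omega
    rw [h1, ← min_assoc]
    rfl

theorem le_rmaxF (d : ℕ) (g : ℕ → Int) (j t : ℕ) (h : t ≤ d) : g (j+t) ≤ rmaxF d g j := by
  induction d generalizing j t with
  | zero => simp_all [rmaxF]
  | succ d ih =>
    show _ ≤ max (g j) (rmaxF d g (j+1))
    rcases Nat.eq_zero_or_pos t with h0 | h0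
    · subst h0; simp
    · have : g (j+t) = g ((j+1) + (t-1)) := by congr 1; omega
      rw [this]
      exact le_trans (ih (j+1) (t-1) (by omega)) (le_max_right _ _)

theorem rminF_le (d : ℕ) (g : ℕ → Int) (j t : ℕ) (h : t ≤ d) : rminF d g j ≤ g (j+t) := by
  induction d generalizing j t with
  | zero => simp_all [rminF]
  | succ d ih =>
    show min (g j) (rminF d g (j+1)) ≤ _
    rcases Nat.eq_zero_or_pos t with h0 | h0
    · subst h0; simp
    · have : g (j+t) = g ((j+1) + (t-1)) := by congr 1; omega
      rw [this]
      exact le_trans (min_le_right _ _) (ih (j+1) (t-1) (by omega))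

theorem rmaxF_le (d : ℕ) (g : ℕ → Int) (j : ℕ) (c : Int) (h : ∀ t, t ≤ d → g (j+t) ≤ c) :
    rmaxF d g j ≤ c := by
  induction d generalizing j with
  | zero => simpa using h 0 (by omega)
  | succ d ih =>
    show max (g j) (rmaxF d g (j+1)) ≤ c
    refine max_le (by simpa using h 0 (by omega)) (ih (j+1) ?_)
    intro t ht
    have : (j+1)+t = j+(t+1) := by omega
    rw [this]; exact h (t+1) (by omega)

theorem rmaxF_exists (d : ℕ) (g : ℕ → Int) (j : ℕ) : ∃ t, t ≤ d ∧ rmaxF d g j = g (j+t) := by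
  induction d generalizing j with
  | zero => exact ⟨0, by simp [rmaxF]⟩
  | succ d ih =>
    obtain ⟨t, ht, he⟩ := ih (j+1)
    show ∃ t', t' ≤ d+1 ∧ max (g j) (rmaxF d g (j+1)) = g (j+t')
    rcases max_cases (g j) (rmaxF d g (j+1)) with ⟨h1, _⟩ | ⟨h1, _⟩
    · exact ⟨0, by omega, by simpa using h1⟩
    · refine ⟨t+1, by omega, ?_⟩
      rw [h1, he]; congr 1; omega

theorem rminF_exists (d : ℕ) (g : ℕ → Int) (j : ℕ) : ∃ t, t ≤ d ∧ rminF d g j = g (j+t) := by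
  induction d generalizing j with
  | zero => exact ⟨0, by simp [rminF]⟩
  | succ d ih =>
    obtain ⟨t, ht, he⟩ := ih (j+1)
    show ∃ t', t' ≤ d+1 ∧ min (g j) (rminF d g (j+1)) = g (j+t')
    rcases min_cases (g j) (rminF d g (j+1)) with ⟨h1, _⟩ | ⟨h1, _⟩
    · exact ⟨0, by omega, by simpa using h1⟩
    · refine ⟨t+1, by omega, ?_⟩
      rw [h1, he]; congr 1; omega

-- the clean recurrence computed by port B
def aF (A : List Int) : ℕ → Int := fun k => A.getD k 0

def stB (a : ℕ → Int) : ℕ → Int × Int × Int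
  | 0 => stepB (0, a 0, -(a 0)) (a 0)
  | i+1 => stepB (stB a i) (a (i+1))

def dpB (a : ℕ → Int) (i : ℕ) : Int := (stB a i).1
def bpB (a : ℕ → Int) (i : ℕ) : Int := (stB a i).2.1
def bmB (a : ℕ → Int) (i : ℕ) : Int := (stB a i).2.2
def prB (a : ℕ → Int) (t : ℕ) : Int := if t = 0 then 0 else dpB a (t-1)
-- candidate value of a final group starting at t and ending at I, plus the best before t
def gG (a : ℕ → Int) (I t : ℕ) : Int := prB a t + (rmaxF (I - t) a t - rminF (I - t) a t)

theorem dpB_zero (a : ℕ → Int) : dpB a 0 = 0 := by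
  simp [dpB, stB, stepB]

theorem bpB_zero (a : ℕ → Int) : bpB a 0 = a 0 := by
  simp [bpB, stB, stepB]

theorem bmB_zero (a : ℕ → Int) : bmB a 0 = -(a 0) := by
  simp [bmB, stB, stepB]

theorem bpB_succ (a : ℕ → Int) (i : ℕ) : bpB a (i+1) = max (bpB a i) (dpB a i + a (i+1)) := by
  simp [bpB, dpB, stB, stepB]

theorem bmB_succ (a : ℕ → Int) (i : ℕ) : bmB a (i+1) = max (bmB a i) (dpB a i - a (i+1)) := by
  simp [bmB, dpB, stB, stepB]

theorem dpB_succ (a : ℕ → Int) (i : ℕ) :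
    dpB a (i+1) = max (dpB a i) (max (bpB a (i+1) - a (i+1)) (bmB a (i+1) + a (i+1))) := by
  simp [dpB, bpB, bmB, stB, stepB]

theorem dpB_ge_bp (a : ℕ → Int) (i : ℕ) : bpB a i - a i ≤ dpB a i := by
  cases i with
  | zero => rw [bpB_zero, dpB_zero]; omega
  | succ i => rw [dpB_succ]; omega

theorem dpB_ge_bm (a : ℕ → Int) (i : ℕ) : bmB a i + a i ≤ dpB a i := by
  cases i with
  | zero => rw [bmB_zero, dpB_zero]; omega
  | succ i => rw [dpB_succ]; omega

theorem dpB_mono (a : ℕ → Int) {i j : ℕ} (h : i ≤ j) : dpB a i ≤ dpB a j := by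
  induction j with
  | zero => simp_all
  | succ j ih =>
    rcases Nat.lt_or_ge i (j+1) with h1 | h1
    · exact le_trans (ih (by omega)) (by rw [dpB_succ]; omega)
    · have : i = j+1 := by omega
      subst this; rfl

theorem dpB_nonneg (a : ℕ → Int) (i : ℕ) : 0 ≤ dpB a i := by
  have := dpB_mono a (Nat.zero_le i)
  rw [dpB_zero] at this; exact this

theorem prB_mono (a : ℕ → Int) {t p : ℕ} (h : t ≤ p) : prB a t ≤ prB a p := by
  unfold prB
  split_ifs with h1 h2
  · exact le_refl 0
  · exact dpB_nonneg a _
  · omega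
  · exact dpB_mono a (by omega)

theorem prB_succ (a : ℕ → Int) (i : ℕ) : prB a (i+1) = dpB a i := by
  simp [prB]

theorem bp_char (a : ℕ → Int) (i : ℕ) : bpB a i = rmaxF i (fun p => prB a p + a p) 0 := by
  induction i with
  | zero => simp [bpB_zero, rmaxF, prB]
  | succ i ih =>
    rw [bpB_succ, ih, rmaxF_succ_right]
    congr 1
    simp [prB_succ]

theorem bm_char (a : ℕ → Int) (i : ℕ) : bmB a i = rmaxF i (fun p => prB a p - a p) 0 := by
  induction i with
  | zero => simp [bmB_zero, rmaxF, prB]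
  | succ i ih =>
    rw [bmB_succ, ih, rmaxF_succ_right]
    congr 1
    simp [prB_succ]

-- each candidate split value is at most dpB a I
theorem cand_le (a : ℕ → Int) (I t : ℕ) (ht : t ≤ I) : gG a I t ≤ dpB a I := by
  obtain ⟨dp', hdp', hep⟩ := rmaxF_exists (I - t) a t
  obtain ⟨dq', hdq', heq⟩ := rminF_exists (I - t) a t
  set p := t + dp' with hp
  set q := t + dq' with hq
  have hpI : p ≤ I := by omega
  have hqI : q ≤ I := by omega
  have htp : t ≤ p := by omega
  have htq : t ≤ q := by omega
  unfold gG
  rw [hep, heq]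
  rcases Nat.le_total p q with hpq | hpq
  · -- max first: dpB I ≥ dpB q ≥ bpB q - a q ≥ (prB p + a p) - a q ≥ prB t + a p - a q
    have h1 : prB a t ≤ prB a p := prB_mono a htp
    have h2 : prB a p + a p ≤ bpB a q := by
      rw [bp_char]
      have := le_rmaxF q (fun p' => prB a p' + a p') 0 p hpq
      simpa using this
    have h3 : bpB a q - a q ≤ dpB a q := dpB_ge_bp a q
    have h4 : dpB a q ≤ dpB a I := dpB_mono a hqI
    omega
  · -- min first: dpB I ≥ dpB p ≥ bmB p + a p ≥ (prB q - a q) + a p ≥ prB t + a p - a q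
    have h1 : prB a t ≤ prB a q := prB_mono a htq
    have h2 : prB a q - a q ≤ bmB a p := by
      rw [bm_char]
      have := le_rmaxF p (fun q' => prB a q' - a q') 0 q hpq
      simpa using this
    have h3 : bmB a p + a p ≤ dpB a p := dpB_ge_bm a p
    have h4 : dpB a p ≤ dpB a I := dpB_mono a hpI
    omega

-- THE CORE: A's max-over-splits formula equals B's value
theorem core (a : ℕ → Int) (I : ℕ) : rmaxF I (gG a I) 0 = dpB a I := by
  induction I with
  | zero => simp [rmaxF, gG, rminF, prB, dpB_zero]
  | succ I ih =>
    apply le_antisymm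
    · apply rmaxF_le
      intro t ht
      simpa using cand_le a (I+1) t (by omega)
    · rw [dpB_succ]
      have hdpI : dpB a I ≤ rmaxF (I+1) (gG a (I+1)) 0 := by
        rw [← ih]
        apply rmaxF_le
        intro t ht
        simp only [Nat.zero_add]
        have hgt : gG a I t ≤ gG a (I+1) t := by
          unfold gG
          have e1 : I + 1 - t = (I - t) + 1 := by omega
          rw [e1, rmaxF_succ_right, rminF_succ_right]
          have hx : rmaxF (I-t) a t ≤ max (rmaxF (I-t) a t) (a (t+(I-t)+1)) := le_max_left _ _
          have hn : min (rminF (I-t) a t) (a (t+(I-t)+1)) ≤ rminF (I-t) a t := min_le_left _ _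
          omega
        have := le_rmaxF (I+1) (gG a (I+1)) 0 t (by omega)
        simp only [Nat.zero_add] at this
        omega
      have hbp : bpB a (I+1) - a (I+1) ≤ rmaxF (I+1) (gG a (I+1)) 0 := by
        rw [bp_char]
        obtain ⟨p, hp, hep⟩ := rmaxF_exists (I+1) (fun p => prB a p + a p) 0
        simp only [Nat.zero_add] at hep
        rw [hep]
        have h1 : a p ≤ rmaxF (I+1-p) a p := by
          have := le_rmaxF (I+1-p) a p 0 (by omega)
          simpa using this
        have h2 : rminF (I+1-p) a p ≤ a (I+1) := by
          have := rminF_le (I+1-p) a p (I+1-p) (le_refl _)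
          have e : p + (I+1-p) = I+1 := by omega
          rwa [e] at this
        have h3 : gG a (I+1) p ≤ rmaxF (I+1) (gG a (I+1)) 0 := by
          have := le_rmaxF (I+1) (gG a (I+1)) 0 p hp
          simpa using this
        have hgp : gG a (I+1) p = prB a p + (rmaxF (I+1-p) a p - rminF (I+1-p) a p) := rfl
        omega
      have hbm : bmB a (I+1) + a (I+1) ≤ rmaxF (I+1) (gG a (I+1)) 0 := by
        rw [bm_char]
        obtain ⟨q, hq, heq⟩ := rmaxF_exists (I+1) (fun q => prB a q - a q) 0
        simp only [Nat.zero_add] at heq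
        rw [heq]
        have h1 : a (I+1) ≤ rmaxF (I+1-q) a q := by
          have := le_rmaxF (I+1-q) a q (I+1-q) (le_refl _)
          have e : q + (I+1-q) = I+1 := by omega
          rwa [e] at this
        have h2 : rminF (I+1-q) a q ≤ a q := by
          have := rminF_le (I+1-q) a q 0 (by omega)
          simpa using this
        have h3 : gG a (I+1) q ≤ rmaxF (I+1) (gG a (I+1)) 0 := by
          have := le_rmaxF (I+1) (gG a (I+1)) 0 q hq
          simpa using this
        have hgq : gG a (I+1) q = prB a q + (rmaxF (I+1-q) a q - rminF (I+1-q) a q) := rfl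
        omega
      omega

-- ===== relating port A's loops to the recurrence =====

theorem inner_loop (A : List Int) (I : ℕ) (hI1 : 1 ≤ I) (hIn : I < A.length)
    (dpL : List Int) (hlen : dpL.length = A.length)
    (hinv : ∀ k, k < I → dpL.getD k 0 = dpB (aF A) k) :
    ∀ c, c ≤ I →
      (PySem.List.pyRange ((c : ℤ) - 1) (-1) (-1)).foldl (innerStepA A (I : ℤ))
        (rmaxF (I - c) (aF A) c, rminF (I - c) (aF A) c,
         dpL.set I (rmaxF (I - c) (gG (aF A) I) c))
      = (rmaxF I (aF A) 0, rminF I (aF A) 0, dpL.set I (rmaxF I (gG (aF A) I) 0)) := by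
  intro c
  induction c with
  | zero =>
    intro _
    rw [show ((0:ℕ):ℤ) - 1 = -1 by norm_num, PySem.List.pyRange_neg_one_eq_nil (by omega)]
    simp
  | succ c ih =>
    intro hc
    have hIlt : I < dpL.length := by omega
    rw [show (((c+1:ℕ)):ℤ) - 1 = (c:ℤ) by push_cast; ring,
        PySem.List.pyRange_neg_one_cons (by omega), List.foldl_cons]
    have hstep : innerStepA A (I:ℤ)
        (rmaxF (I-(c+1)) (aF A) (c+1), rminF (I-(c+1)) (aF A) (c+1),
         dpL.set I (rmaxF (I-(c+1)) (gG (aF A) I) (c+1))) (c:ℤ)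
      = (rmaxF (I-c) (aF A) c, rminF (I-c) (aF A) c,
         dpL.set I (rmaxF (I-c) (gG (aF A) I) c)) := by
      have egap : I - c = (I-(c+1))+1 := by omega
      have emax : max (rmaxF (I-(c+1)) (aF A) (c+1)) (PySem.List.pyGetD A (c:ℤ) 0)
          = rmaxF (I-c) (aF A) c := by
        rw [egap, show rmaxF ((I-(c+1))+1) (aF A) c
              = max (aF A c) (rmaxF (I-(c+1)) (aF A) (c+1)) from rfl, max_comm]
        simp [aF]
      have emin : min (rminF (I-(c+1)) (aF A) (c+1)) (PySem.List.pyGetD A (c:ℤ) 0)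
          = rminF (I-c) (aF A) c := by
        rw [egap, show rminF ((I-(c+1))+1) (aF A) c
              = min (aF A c) (rminF (I-(c+1)) (aF A) (c+1)) from rfl, min_comm]
        simp [aF]
      have egetI : PySem.List.pyGetD (dpL.set I (rmaxF (I-(c+1)) (gG (aF A) I) (c+1))) (I:ℤ) 0
          = rmaxF (I-(c+1)) (gG (aF A) I) (c+1) := by
        rw [PySem.List.pyGetD_natCast]
        simp [List.getD, hIlt]
      unfold innerStepA
      simp only [emax, emin, egetI, PySem.List.pySetD_natCast, List.set_set]
      rcases Nat.eq_zero_or_pos c with rfl | hcpos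
      · -- j == 0 branch
        simp only [Nat.cast_zero, beq_self_eq_true, if_true]
        refine congrArg (fun v => (rmaxF (I-0) (aF A) 0, rminF (I-0) (aF A) 0, dpL.set I v)) ?_
        have : rmaxF (I-0) (gG (aF A) I) 0
            = max (gG (aF A) I 0) (rmaxF (I-(0+1)) (gG (aF A) I) (0+1)) := by
          rw [show I - 0 = (I-(0+1))+1 by omega]; rfl
        rw [this, max_comm]
        congr 1
        show rmaxF (I-0) (aF A) 0 - rminF (I-0) (aF A) 0 = gG (aF A) I 0
        unfold gG prB
        simp
      · -- j != 0 branch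
        have hne : ((c:ℤ) == 0) = false := by simp; omega
        simp only [hne, if_false, Bool.false_eq_true]
        have ecast : (c:ℤ) - 1 = ((c-1:ℕ):ℤ) := by push_cast [hcpos]; omega
        have egetc : PySem.List.pyGetD (dpL.set I (rmaxF (I-(c+1)) (gG (aF A) I) (c+1))) ((c:ℤ)-1) 0
            = dpB (aF A) (c-1) := by
          rw [ecast, PySem.List.pyGetD_natCast]
          have hne2 : I ≠ c - 1 := by omega
          simp [List.getD, List.getElem?_set, hne2]
          rw [← hinv (c-1) (by omega)]
          simp [List.getD]
        refine congrArg (fun v => (rmaxF (I-c) (aF A) c, rminF (I-c) (aF A) c, dpL.set I v)) ?_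
        rw [egetc]
        have : rmaxF (I-c) (gG (aF A) I) c
            = max (gG (aF A) I c) (rmaxF (I-(c+1)) (gG (aF A) I) (c+1)) := by
          rw [egap]; rfl
        rw [this, max_comm]
        congr 1
        show dpB (aF A) (c-1) + rmaxF (I-c) (aF A) c - rminF (I-c) (aF A) c = gG (aF A) I c
        unfold gG prB
        rw [if_neg (by omega)]
        ring
    rw [hstep]
    exact ih (by omega)

theorem outer_step (A : List Int) (I : ℕ) (hI1 : 1 ≤ I) (hIn : I < A.length)
    (dpL : List Int) (hlen : dpL.length = A.length)
    (hinv : ∀ k, k < I → dpL.getD k 0 = dpB (aF A) k) :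
    outerStepA A dpL (I : ℤ) = dpL.set I (dpB (aF A) I) := by
  unfold outerStepA
  have e1 : PySem.List.pyGetD A (I:ℤ) 0 = rmaxF (I-I) (aF A) I := by
    rw [show I - I = 0 by omega]; simp [rmaxF, aF]
  have e1' : PySem.List.pyGetD A (I:ℤ) 0 = rminF (I-I) (aF A) I := by
    rw [show I - I = 0 by omega]; simp [rminF, aF]
  have e2 : PySem.List.pySetD dpL (I:ℤ) (PySem.List.pyGetD dpL ((I:ℤ)-1) 0)
      = dpL.set I (rmaxF (I-I) (gG (aF A) I) I) := by
    rw [PySem.List.pySetD_natCast]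
    congr 1
    rw [show (I:ℤ) - 1 = ((I-1:ℕ):ℤ) by push_cast [hI1]; omega, PySem.List.pyGetD_natCast,
        hinv (I-1) (by omega), show I - I = 0 by omega]
    show dpB (aF A) (I-1) = gG (aF A) I I
    unfold gG prB
    rw [if_neg (by omega)]
    simp [rmaxF, rminF]
  conv_lhs => rw [e2]
  rw [show ((I:ℤ) - 1) = ((I:ℕ):ℤ) - 1 from rfl]
  have := inner_loop A I hI1 hIn dpL hlen hinv I (le_refl I)
  rw [e1]
  conv_lhs =>
    rw [show (rmaxF (I-I) (aF A) I, rmaxF (I-I) (aF A) I,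
          dpL.set I (rmaxF (I-I) (gG (aF A) I) I))
        = (rmaxF (I-I) (aF A) I, rminF (I-I) (aF A) I,
          dpL.set I (rmaxF (I-I) (gG (aF A) I) I)) by
      rw [show I - I = 0 by omega]; rfl]
  rw [this]
  simp [core]

theorem outer_loop (A : List Int) (i : ℕ) (hi : i < A.length) :
    ∃ L, (PySem.List.pyRange 1 ((i : ℤ) + 1) 1).foldl (outerStepA A) (List.replicate A.length (0 : Int)) = L
      ∧ L.length = A.length ∧ ∀ k, k < A.length → L.getD k 0 = if k ≤ i then dpB (aF A) k else 0 := by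
  induction i with
  | zero =>
    refine ⟨List.replicate A.length 0, ?_, by simp, ?_⟩
    · rw [show ((0:ℕ):ℤ) + 1 = 1 by norm_num, PySem.List.pyRange_one_eq_nil (by omega)]
      simp
    · intro k hk
      rcases Nat.eq_zero_or_pos k with rfl | hk0
      · simp [List.getD, hk, dpB_zero]
      · rw [if_neg (by omega)]
        simp [List.getD, hk]
  | succ i ih =>
    obtain ⟨L, hL, hlen, hval⟩ := ih (by omega)
    refine ⟨L.set (i+1) (dpB (aF A) (i+1)), ?_, by simpa using hlen, ?_⟩
    · rw [show (((i+1:ℕ)):ℤ) + 1 = ((i:ℤ)+1) + 1 by push_cast; ring,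
          PySem.List.pyRange_one_succ_right (by omega), List.foldl_append, hL]
      simp only [List.foldl_cons, List.foldl_nil]
      rw [show ((i:ℤ)+1) = (((i+1:ℕ)):ℤ) by push_cast; ring]
      exact outer_step A (i+1) (by omega) hi L hlen
        (fun k hk => by rw [hval k (by omega), if_pos (by omega)])
    · intro k hk
      by_cases hke : k = i+1
      · subst hke
        rw [if_pos (le_refl _)]
        have hkl : i+1 < L.length := by omega
        simp [List.getD, hkl]
      · have he : (L.set (i+1) (dpB (aF A) (i+1))).getD k 0 = L.getD k 0 := by
          simp [List.getD, List.getElem?_set, Ne.symm hke]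
        rw [he, hval k hk]
        by_cases hki : k ≤ i
        · rw [if_pos hki, if_pos (by omega)]
        · rw [if_neg hki, if_neg (by omega)]

theorem solve7_eq_dpB (A : List Int) (h : A ≠ []) :
    solve7 A = dpB (aF A) (A.length - 1) := by
  have hn : 1 ≤ A.length := by
    cases A with
    | nil => exact absurd rfl h
    | cons x xs => simp
  obtain ⟨L, hL, hlen, hval⟩ := outer_loop A (A.length - 1) (by omega)
  rw [show (((A.length - 1 : ℕ)):ℤ) + 1 = (A.length:ℤ) by push_cast [hn]; omega] at hL
  show PySem.List.pyGetD ((PySem.List.pyRange 1 (A.length:ℤ) 1).foldl (outerStepA A)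
    (List.replicate A.length 0)) ((A.length:ℤ) - 1) 0 = _
  rw [hL, show ((A.length:ℤ) - 1) = (((A.length - 1:ℕ)):ℤ) by push_cast [hn]; omega,
      PySem.List.pyGetD_natCast, hval (A.length - 1) (by omega), if_pos (le_refl _)]

theorem foldl_stB (a : ℕ → Int) (xs : List Int) (m : ℕ)
    (hx : ∀ k, k < xs.length → xs.getD k 0 = a (m+1+k)) :
    xs.foldl stepB (stB a m) = stB a (m + xs.length) := by
  induction xs generalizing m with
  | nil => simp
  | cons x xs ih =>
    have hx0 : x = a (m+1) := by simpa using hx 0 (by simp)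
    show xs.foldl stepB (stepB (stB a m) x) = _
    have : stepB (stB a m) x = stB a (m+1) := by rw [hx0]; rfl
    rw [this, ih (m+1) ?_]
    · congr 1; simp; omega
    · intro k hk
      have := hx (k+1) (by simp; omega)
      simpa [show m+1+1+k = m+1+(k+1) by omega] using this

theorem solve7_alt_eq_dpB (A : List Int) (h : A ≠ []) :
    solve7_alt A = dpB (aF A) (A.length - 1) := by
  cases A with
  | nil => exact absurd rfl h
  | cons x xs =>
    show (List.foldl stepB (0, PySem.List.pyGetD (x::xs) 0 0, -(PySem.List.pyGetD (x::xs) 0 0)) (x::xs)).1 = _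
    rw [show PySem.List.pyGetD (x::xs) 0 0 = x by simp [PySem.List.pyGetD_zero], List.foldl_cons]
    have h1 : stepB (0, x, -x) x = stB (aF (x::xs)) 0 := by
      show _ = stepB (0, aF (x::xs) 0, -(aF (x::xs) 0)) (aF (x::xs) 0)
      simp [aF]
    rw [h1, foldl_stB (aF (x::xs)) xs 0 ?_]
    · show dpB (aF (x::xs)) (0 + xs.length) = _
      simp [dpB]
    · intro k hk
      simp [aF]
      rw [show 0+1+k = k+1 by omega]
      simp [List.getD]

-- ===== VERDICT (by name: the statement is the Claim_ definition above) =====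
theorem solve7_spec : Claim_equal_solve7 := by
  intro A _ hpre
  unfold Spec_solve7
  rw [solve7_eq_dpB A hpre, solve7_alt_eq_dpB A hpre]
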